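-- pv_equiv track=rewrite | github.com/rodolfomac3/Reference-Genome | app.py | _degenerate_match_count
-- ===== SOURCE A (Python) =====
-- _IUPAC = {
--     "A":{"A"}, "C":{"C"}, "G":{"G"}, "T":{"T"},
--     "R":{"A","G"}, "Y":{"C","T"}, "S":{"G","C"}, "W":{"A","T"},
--     "K":{"G","T"}, "M":{"A","C"},
--     "B":{"C","G","T"}, "D":{"A","G","T"}, "H":{"A","C","T"}, "V":{"A","C","G"},
--     "N":{"A","C","G","T"},
--     "-":{"-"}  # treat gap as its own (for alignment paths)
-- }
--
-- def _iupac_match(primer_char: str, template_char: str) -> bool: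
--     p = primer_char.upper(); t = template_char.upper()
--     return t in _IUPAC.get(p, {p})
--
-- def _degenerate_match_count(kmer: str, hay: str) -> int:
--     """Count occurrences of IUPAC kmer in hay (no RC here)."""
--     k = len(kmer)
--     if k == 0: return 0
--     c = 0
--     for i in range(0, len(hay)-k+1):
--         seg = hay[i:i+k]
--         ok = True
--         for a,b in zip(kmer, seg):
--             if not _iupac_match(a, b):
--                 ok = False; break
--         if ok: c += 1
--     return c
-- ===== SOURCE B (Python) =====
-- _IUPAC = {
--     "A":{"A"}, "C":{"C"}, "G":{"G"}, "T":{"T"},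
--     "R":{"A","G"}, "Y":{"C","T"}, "S":{"G","C"}, "W":{"A","T"},
--     "K":{"G","T"}, "M":{"A","C"},
--     "B":{"C","G","T"}, "D":{"A","G","T"}, "H":{"A","C","T"}, "V":{"A","C","G"},
--     "N":{"A","C","G","T"},
--     "-":{"-"}
-- }
--
-- def _iupac_match(primer_char: str, template_char: str) -> bool:
--     p = primer_char.upper(); t = template_char.upper()
--     return t in _IUPAC.get(p, {p})
--
-- def _degenerate_match_count(kmer: str, hay: str) -> int:
--     """Bit-parallel Shift-And: per-template-letter match masks built in one pass
--     over the kmer, then one pass over hay updating a bit-vector of partial matches."""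
--     k = len(kmer)
--     if k == 0:
--         return 0
--     pos = {}
--     for j, p in enumerate(kmer):
--         pu = p.upper()
--         for u in _IUPAC.get(pu, {pu}):
--             pos[u] = pos.get(u, 0) | (1 << j)
--     full = 1 << (k - 1)
--     d = 0
--     c = 0
--     for t in hay:
--         d = ((d << 1) | 1) & pos.get(t.upper(), 0)
--         if d & full:
--             c += 1
--     return c
-- ===== Notes on version B (the rewrite author's own statement) =====
-- stated objective: alternative
-- what changed: Replaced the per-start-position window rescan by the bit-parallel Shift-And algorithm: per-template-letter IUPAC match masks are built in one pass over the kmer, then a single pass over hay updates one bit-vector of partial-match states and counts full matches; it trades A's early-exit window scans for word-parallel bit operations.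
import Mathlib
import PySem

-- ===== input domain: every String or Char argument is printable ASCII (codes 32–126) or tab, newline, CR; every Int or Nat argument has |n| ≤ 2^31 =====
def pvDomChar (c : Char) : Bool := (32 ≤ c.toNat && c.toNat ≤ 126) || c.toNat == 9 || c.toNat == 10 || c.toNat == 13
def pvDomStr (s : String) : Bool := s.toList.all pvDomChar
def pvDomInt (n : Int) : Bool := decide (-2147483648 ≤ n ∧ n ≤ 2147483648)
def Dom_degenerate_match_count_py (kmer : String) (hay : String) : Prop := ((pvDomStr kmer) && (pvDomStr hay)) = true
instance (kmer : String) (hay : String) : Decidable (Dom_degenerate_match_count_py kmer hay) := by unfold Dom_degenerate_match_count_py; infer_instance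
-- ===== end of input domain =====

-- B replaces A's per-start-position rescan of the whole kmer by the bit-parallel
-- Shift-And algorithm (per-character IUPAC match masks precomputed once, then a
-- single pass over hay updating one bit-vector of partial-match states); same
-- return value, no mutation on either side.

-- ===== PORT A =====
-- shared module context: the _IUPAC table and _iupac_match (used by both programs)
def pvIUPAC : PySem.Dict Char (PySem.Set Char) :=
  PySem.Dict.ofList [
    ('A', PySem.Set.ofList ['A']), ('C', PySem.Set.ofList ['C']),
    ('G', PySem.Set.ofList ['G']), ('T', PySem.Set.ofList ['T']),
    ('R', PySem.Set.ofList ['A','G']), ('Y', PySem.Set.ofList ['C','T']),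
    ('S', PySem.Set.ofList ['G','C']), ('W', PySem.Set.ofList ['A','T']),
    ('K', PySem.Set.ofList ['G','T']), ('M', PySem.Set.ofList ['A','C']),
    ('B', PySem.Set.ofList ['C','G','T']), ('D', PySem.Set.ofList ['A','G','T']),
    ('H', PySem.Set.ofList ['A','C','T']), ('V', PySem.Set.ofList ['A','C','G']),
    ('N', PySem.Set.ofList ['A','C','G','T']),
    ('-', PySem.Set.ofList ['-'])]

def pvIupacMatch (primerChar : Char) (templateChar : Char) : Bool :=
  let p := PySem.Chars.upperChar primerChar
  let t := PySem.Chars.upperChar templateChar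
  PySem.Set.contains ((pvIUPAC.get? p).getD (PySem.Set.ofList [p])) t

-- A's inner 'for a,b in zip(kmer, seg): if not _iupac_match(a,b): ok=False; break'
def pvZipOk : List Char → List Char → Bool
  | p :: ps, t :: ts => if pvIupacMatch p t then pvZipOk ps ts else false
  | _, _ => true

def degenerate_match_count_py (kmer : String) (hay : String) : Int :=
  let kl := kmer.toList
  let hl := hay.toList
  let k : Int := (kl.length : Int)
  if k == 0 then 0
  else
    (PySem.List.pyRange 0 ((hl.length : Int) - k + 1) 1).foldl
      (fun c i =>
        if pvZipOk kl (PySem.List.slice hl (some i) (some (i + k))) then c + 1 else c) 0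

-- ===== PORT B =====
-- Source B's mask-building pass: for each kmer position j, set bit j in the mask of
-- every (uppercase) template letter its IUPAC code accepts
-- (all values nonnegative Python ints, so Nat bit operations are exact here)
def pvPosMasks (kl : List Char) : PySem.Dict Char Nat :=
  (PySem.List.enumerate kl 0).foldl (fun d jp =>
    ((pvIUPAC.get? (PySem.Chars.upperChar jp.2)).getD
        (PySem.Set.ofList [PySem.Chars.upperChar jp.2])).foldl
      (fun d u => d.insert u ((d.getD u 0) ||| (1 <<< jp.1.toNat))) d) PySem.Dict.empty

def degenerate_match_count_py_alt (kmer : String) (hay : String) : Int :=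
  let kl := kmer.toList
  let hl := hay.toList
  let k := kl.length
  if k == 0 then 0
  else
    let pos := pvPosMasks kl
    let full : Nat := 1 <<< (k - 1)
    (hl.foldl (fun (s : Nat × Int) t =>
        let d := ((s.1 <<< 1) ||| 1) &&& (pos.getD (PySem.Chars.upperChar t) 0)
        (d, if d &&& full ≠ 0 then s.2 + 1 else s.2)) (0, 0)).2

-- ===== PRECONDITION & SPEC =====
def Spec_degenerate_match_count_py (kmer : String) (hay : String) (out : Int) : Prop := out = degenerate_match_count_py_alt kmer hay
instance (kmer : String) (hay : String) (out : Int) : Decidable (Spec_degenerate_match_count_py kmer hay out) := by unfold Spec_degenerate_match_count_py; infer_instance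

-- ===== CLAIM (what is proved, stated in full; the proofs are below) =====
def Claim_equal_degenerate_match_count_py : Prop := ∀ (kmer : String) (hay : String), Dom_degenerate_match_count_py kmer hay → Spec_degenerate_match_count_py kmer hay (degenerate_match_count_py kmer hay)

-- ===== LEMMAS AND PROOFS =====

-- pvIsP ps r: the reversed kmer-prefix ps matches, position by position, the
-- front of r (= the reversed consumed part of hay); fails if r is too short.
def pvIsP : List Char → List Char → Bool
  | [], _ => true
  | _ :: _, [] => false
  | p :: ps, t :: ts => pvIupacMatch p t && pvIsP ps ts

-- full match of kl ending exactly at the front of reversed-consumed r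
def pvF (kl : List Char) (r : List Char) : Bool := pvIsP kl.reverse r

-- pure (dict-free) form of B's loop body
def pvStep (kl : List Char) (s : Nat × Int) (t : Char) : Nat × Int :=
  let d := ((s.1 <<< 1) ||| 1) &&& ((pvPosMasks kl).getD (PySem.Chars.upperChar t) 0)
  (d, if d &&& (1 <<< (kl.length - 1)) ≠ 0 then s.2 + 1 else s.2)

-- number of full matches ending inside rest, after reversed-consumed prefix r
def pvCountEnds (kl : List Char) : List Char → List Char → Int
  | [], _ => 0
  | t :: rest, r => ((if pvF kl (t :: r) then 1 else 0) + pvCountEnds kl rest (t :: r))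

-- B's bit-vector invariant
def pvInv (kl : List Char) (d : Nat) (r : List Char) : Prop :=
  ∀ j : Nat, d.testBit j = (decide (j < kl.length) && pvIsP ((kl.take (j+1)).reverse) r)

theorem pvZipOk_eq_all (a b : List Char) :
    pvZipOk a b = (a.zip b).all (fun pt => pvIupacMatch pt.1 pt.2) := by
  induction a generalizing b with
  | nil => simp [pvZipOk]
  | cons p ps ih =>
    cases b with
    | nil => simp [pvZipOk]
    | cons t ts => by_cases h : pvIupacMatch p t <;> simp [pvZipOk, h, ih]

theorem pvIsP_eq (a b : List Char) :
    pvIsP a b = (decide (a.length ≤ b.length) && pvZipOk a b) := by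
  induction a generalizing b with
  | nil => simp [pvIsP, pvZipOk]
  | cons p ps ih =>
    cases b with
    | nil => simp [pvIsP, pvZipOk]
    | cons t ts =>
      by_cases h : pvIupacMatch p t <;> simp [pvIsP, pvZipOk, h, ih]

theorem pvIsP_nil_right (a : List Char) : pvIsP a [] = decide (a = []) := by
  cases a <;> simp [pvIsP]

theorem pv_testBit_one (m : Nat) : Nat.testBit 1 m = decide (m = 0) := by
  cases m with
  | zero => simp
  | succ m => rw [Nat.testBit_succ]; simp

theorem pv_zip_reverse (a b : List Char) (h : a.length = b.length) :
    a.reverse.zip b.reverse = (a.zip b).reverse := by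
  induction a generalizing b with
  | nil =>
    cases b with
    | nil => simp
    | cons t ts => simp at h
  | cons p ps ih =>
    cases b with
    | nil => simp at h
    | cons t ts =>
      simp only [List.length_cons, Nat.add_right_cancel_iff] at h
      simp only [List.reverse_cons, List.zip_cons_cons]
      rw [List.zip_append (by simp [h]), ih ts h]
      simp

theorem pvZipOk_reverse (a b : List Char) (h : a.length = b.length) :
    pvZipOk a.reverse b.reverse = pvZipOk a b := by
  rw [pvZipOk_eq_all, pvZipOk_eq_all, pv_zip_reverse a b h, List.all_reverse]

theorem pv_inner_fold (us : List Char) (m : Nat) (d : PySem.Dict Char Nat) (u : Char) :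
    ((us.foldl (fun d v => d.insert v ((d.getD v 0) ||| m)) d).getD u 0)
      = if u ∈ us then (d.getD u 0) ||| m else d.getD u 0 := by
  induction us generalizing d with
  | nil => simp
  | cons v us ih =>
    simp only [List.foldl_cons, ih, PySem.Dict.getD_insert, List.mem_cons]
    by_cases h1 : u ∈ us
    · by_cases h2 : u = v <;> simp [h1, h2]
    · by_cases h2 : u = v <;> simp [h1, h2]

theorem pvPos_aux (kl : List Char) (u : Char) (s : Nat) (d0 : PySem.Dict Char Nat) (j : Nat) :
    (((PySem.List.enumerate kl (s : Int)).foldl (fun d jp =>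
        ((pvIUPAC.get? (PySem.Chars.upperChar jp.2)).getD
          (PySem.Set.ofList [PySem.Chars.upperChar jp.2])).foldl
          (fun d v => d.insert v ((d.getD v 0) ||| (1 <<< jp.1.toNat))) d) d0).getD u 0).testBit j
      = ((d0.getD u 0).testBit j || (decide (s ≤ j)
          && (kl[j - s]?.map (fun p => decide (u ∈ ((pvIUPAC.get? (PySem.Chars.upperChar p)).getD
              (PySem.Set.ofList [PySem.Chars.upperChar p]) : List Char)))).getD false)) := by
  induction kl generalizing s d0 with
  | nil => simp [PySem.List.enumerate_nil]
  | cons x kl ih =>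
    rw [PySem.List.enumerate_cons]
    have hcast : (s : Int) + 1 = ((s + 1 : Nat) : Int) := by push_cast; ring
    simp only [List.foldl_cons, hcast, ih]
    have htn : ((s : Int)).toNat = s := Int.toNat_natCast s
    rw [htn, pv_inner_fold]
    rcases Nat.lt_trichotomy j s with hjs | hjs | hjs
    · have h1 : ¬ s ≤ j := by omega
      have h2 : ¬ s + 1 ≤ j := by omega
      by_cases hm : u ∈ ((pvIUPAC.get? (PySem.Chars.upperChar x)).getD
          (PySem.Set.ofList [PySem.Chars.upperChar x]) : List Char) <;>
        simp [hm, h1, h2, Nat.testBit_or, Nat.testBit_shiftLeft]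
    · subst hjs
      have h2 : ¬ j + 1 ≤ j := by omega
      by_cases hm : u ∈ ((pvIUPAC.get? (PySem.Chars.upperChar x)).getD
          (PySem.Set.ofList [PySem.Chars.upperChar x]) : List Char) <;>
        simp [hm, h2, Nat.testBit_or, Nat.testBit_shiftLeft]
    · have h1 : s ≤ j := by omega
      have h2 : s + 1 ≤ j := by omega
      have h3 : ¬ j - s = 0 := by omega
      have h4 : j - (s + 1) = (j - s) - 1 := by omega
      have h5 : (x :: kl)[j - s]? = kl[j - s - 1]? := by
        cases hq : j - s with
        | zero => omega
        | succ m => simp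
      by_cases hm : u ∈ ((pvIUPAC.get? (PySem.Chars.upperChar x)).getD
          (PySem.Set.ofList [PySem.Chars.upperChar x]) : List Char) <;>
        simp [hm, h1, h2, h3, h4, h5, Nat.testBit_or, Nat.testBit_shiftLeft, pv_testBit_one]

theorem pv_mem_upper (p t : Char) :
    decide (PySem.Chars.upperChar t ∈ ((pvIUPAC.get? (PySem.Chars.upperChar p)).getD
        (PySem.Set.ofList [PySem.Chars.upperChar p]) : List Char)) = pvIupacMatch p t := by
  simp [pvIupacMatch, PySem.Set.contains]

theorem pvMask_testBit (kl : List Char) (t : Char) (j : Nat) :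
    (((pvPosMasks kl).getD (PySem.Chars.upperChar t) 0)).testBit j
      = (kl[j]?.map (fun p => pvIupacMatch p t)).getD false := by
  have haux := pvPos_aux kl (PySem.Chars.upperChar t) 0 PySem.Dict.empty j
  simp only [Nat.cast_zero] at haux
  rw [pvPosMasks, haux]
  cases h : kl[j]? with
  | none => simp
  | some p => simp [pv_mem_upper]

theorem pv_and_shift_ne (d i : Nat) : (d &&& (1 <<< i) ≠ 0) ↔ d.testBit i = true := by
  rw [Nat.one_shiftLeft, Nat.and_two_pow]
  cases h : d.testBit i
  · simp
  · simp

theorem pvInv_step (kl : List Char) (t : Char) (r : List Char) (d : Nat)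
    (hd : pvInv kl d r) : pvInv kl (((d <<< 1) ||| 1) &&& ((pvPosMasks kl).getD (PySem.Chars.upperChar t) 0)) (t :: r) := by
  intro j
  rw [Nat.testBit_and, Nat.testBit_or, Nat.testBit_shiftLeft, pvMask_testBit]
  by_cases hj : j < kl.length
  · have hsome : kl[j]? = some kl[j] := List.getElem?_eq_getElem hj
    have htake : (kl.take (j+1)).reverse = kl[j] :: (kl.take j).reverse := by
      rw [List.take_succ_eq_append_getElem hj, List.reverse_append]; simp
    rw [htake]
    cases j with
    | zero =>
      simp [hj, pvIsP, List.take_zero]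
    | succ j' =>
      have hj' : j' < kl.length := by omega
      have := hd j'
      simp [hj, pvIsP, this, hj', pv_testBit_one, Bool.and_comm]
  · have hnone : kl[j]? = none := List.getElem?_eq_none (by omega)
    simp [hj]

theorem pv_loop (kl : List Char) (hk : kl ≠ []) (rest : List Char) :
    ∀ (r : List Char) (d : Nat) (c : Int), pvInv kl d r →
      (rest.foldl (pvStep kl) (d, c)).2 = c + pvCountEnds kl rest r := by
  induction rest with
  | nil => intro r d c _; simp [pvCountEnds]
  | cons t rest ih =>
    intro r d c hd
    have hstep := pvInv_step kl t r d hd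
    have hbit : ((((d <<< 1) ||| 1) &&& ((pvPosMasks kl).getD (PySem.Chars.upperChar t) 0)) &&& (1 <<< (kl.length - 1)) ≠ 0)
        ↔ pvF kl (t :: r) = true := by
      rw [pv_and_shift_ne]
      have := hstep (kl.length - 1)
      rw [this]
      have h1 : kl.length - 1 < kl.length := by
        cases kl with | nil => exact absurd rfl hk | cons a l => simp
      have h2 : kl.length - 1 + 1 = kl.length := by omega
      simp [h1, h2, pvF, List.take_length]
    simp only [List.foldl_cons, pvStep]
    rw [ih (t :: r) _ _ hstep]
    by_cases hb : pvF kl (t :: r) = true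
    · rw [if_pos (hbit.mpr hb)]
      simp [pvCountEnds, hb]; ring
    · rw [if_neg (fun h => hb (hbit.mp h))]
      simp [pvCountEnds, hb]

theorem pvCountEnds_eq (kl : List Char) (rest : List Char) :
    ∀ r, pvCountEnds kl rest r
      = ((List.range rest.length).countP (fun i => pvF kl ((rest.take (i+1)).reverse ++ r)) : Int) := by
  induction rest with
  | nil => intro r; simp [pvCountEnds]
  | cons t rest ih =>
    intro r
    simp only [pvCountEnds, ih (t :: r), List.length_cons, List.range_succ_eq_map,
      List.countP_cons, List.countP_map]
    have h0 : ((t :: rest).take 1).reverse ++ r = t :: r := by simp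
    have hcong : (List.countP ((fun i => pvF kl (((t :: rest).take (i+1)).reverse ++ r)) ∘ Nat.succ) (List.range rest.length))
        = List.countP (fun i => pvF kl ((rest.take (i+1)).reverse ++ (t :: r))) (List.range rest.length) := by
      apply List.countP_congr
      intro i _
      simp [Function.comp]
    rw [hcong, h0]
    by_cases hb : pvF kl (t :: r) = true
    · simp [hb]; omega
    · simp [hb]

theorem pv_zip_take (a : List Char) : ∀ b : List Char, a.zip (b.take a.length) = a.zip b := by
  induction a with
  | nil => intro b; simp
  | cons p ps ih =>
    intro b
    cases b with
    | nil => simp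
    | cons t ts => simp [ih ts]

theorem pvF_take (kl hl : List Char) (e : Nat) (he : e < hl.length) :
    pvF kl ((hl.take (e+1)).reverse)
      = (decide (kl.length ≤ e+1) && pvZipOk kl ((hl.drop (e+1 - kl.length)).take kl.length)) := by
  have hx : (hl.take (e+1)).length = e + 1 := by
    rw [List.length_take]; omega
  rw [pvF, pvIsP_eq]
  rw [List.length_reverse, List.length_reverse, hx]
  by_cases hke : kl.length ≤ e + 1
  · have hy : ((hl.take (e+1)).drop (e+1 - kl.length)).length = kl.length := by
      rw [List.length_drop, hx]; omega
    have hrev : ((hl.take (e+1)).drop (e+1 - kl.length)).reverse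
        = (hl.take (e+1)).reverse.take kl.length := by
      rw [List.reverse_drop, hx]
      congr 1; omega
    have hzip : pvZipOk kl.reverse (hl.take (e+1)).reverse
        = pvZipOk kl.reverse ((hl.take (e+1)).drop (e+1 - kl.length)).reverse := by
      rw [pvZipOk_eq_all, pvZipOk_eq_all, hrev]
      rw [show kl.length = kl.reverse.length from (List.length_reverse).symm, pv_zip_take]
    rw [hzip, pvZipOk_reverse _ _ (by rw [hy])]
    rw [List.drop_take, show e + 1 - (e + 1 - kl.length) = kl.length by omega]
  · simp [hke]

theorem pv_reindex (q : Nat → Bool) (k : Nat) (hk : 1 ≤ k) (n : Nat) :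
    (List.range n).countP (fun e => decide (k ≤ e+1) && q (e+1-k)) = (List.range (n+1-k)).countP q := by
  induction n with
  | zero =>
    have : 1 - k = 0 := by omega
    simp [this]
  | succ n ih =>
    rw [List.range_succ, List.countP_append, ih]
    by_cases h : k ≤ n + 1
    · have h2 : n + 1 + 1 - k = (n + 1 - k) + 1 := by omega
      rw [h2, List.range_succ, List.countP_append]
      simp [h]
    · have h2 : n + 1 + 1 - k = n + 1 - k := by omega
      rw [h2]
      simp [h]

-- ===== VERDICT (by name: the statement is the Claim_ definition above) =====
theorem degenerate_match_count_py_spec : Claim_equal_degenerate_match_count_py := by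
  intro kmer hay _
  unfold Spec_degenerate_match_count_py
  unfold degenerate_match_count_py degenerate_match_count_py_alt
  by_cases hkl : kmer.toList = []
  · simp [hkl]
  · have hk1 : 1 ≤ kmer.toList.length := List.length_pos_of_ne_nil hkl
    set kl := kmer.toList with hklDef
    set hl := hay.toList with hhlDef
    have hA : ((kl.length : Int) == 0) = false := by
      simp; omega
    have hB : (kl.length == 0) = false := by
      simp; omega
    simp only [hA, hB, Bool.false_eq_true, if_false]
    -- A side: fold over the range is a countP
    have hN : (((hl.length : Int) - (kl.length : Int) + 1) - 0).toNat = hl.length + 1 - kl.length := by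
      omega
    rw [PySem.List.pyRange_one, hN, List.foldl_map,
      PySem.List.foldl_if_add_one
        (p := fun (j : Nat) => pvZipOk kl (PySem.List.slice hl (some (0 + (j : Int)))
          (some (0 + (j : Int) + (kl.length : Int)))))]
    have hAcount : List.countP (fun (j : Nat) => pvZipOk kl (PySem.List.slice hl (some (0 + (j : Int)))
          (some (0 + (j : Int) + (kl.length : Int))))) (List.range (hl.length + 1 - kl.length))
        = List.countP (fun (j : Nat) => pvZipOk kl ((hl.drop j).take kl.length))
            (List.range (hl.length + 1 - kl.length)) := by
      apply List.countP_congr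
      intro j _
      have : PySem.List.slice hl (some (0 + (j : Int))) (some (0 + (j : Int) + (kl.length : Int)))
          = (hl.drop j).take kl.length := by
        rw [zero_add, PySem.List.slice_natCast_add hl j kl.length]
      rw [this]
    rw [hAcount]
    -- B side: its fold body is pvStep by definition
    have hinv0 : pvInv kl 0 [] := by
      intro j
      by_cases hj : j < kl.length <;>
        simp [hj, pvIsP_nil_right, List.take_eq_nil_iff, hkl]
    have hloop := pv_loop kl hkl hl [] 0 0 hinv0
    rw [show (hl.foldl (fun (s : Nat × Int) t =>
        let d := ((s.1 <<< 1) ||| 1) &&& ((pvPosMasks kl).getD (PySem.Chars.upperChar t) 0)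
        (d, if d &&& (1 <<< (kl.length - 1)) ≠ 0 then s.2 + 1 else s.2)) (0, 0))
      = hl.foldl (pvStep kl) (0, 0) from rfl]
    rw [hloop, pvCountEnds_eq kl hl []]
    -- identify the two counts
    have hcong : List.countP (fun i => pvF kl ((hl.take (i+1)).reverse ++ [])) (List.range hl.length)
        = List.countP (fun e => decide (kl.length ≤ e + 1)
            && pvZipOk kl ((hl.drop (e + 1 - kl.length)).take kl.length)) (List.range hl.length) := by
      apply List.countP_congr
      intro e he
      rw [List.mem_range] at he
      rw [List.append_nil, pvF_take kl hl e he]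
    rw [hcong, pv_reindex (fun j => pvZipOk kl ((hl.drop j).take kl.length)) kl.length hk1 hl.length]
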